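-- pv_equiv track=rewrite | github.com/CederGroupHub/WFacer | comp_space.py | flipvec_to_operations
-- ===== SOURCE A (Python) =====
-- def flipvec_to_operations(unit_n_swps, nbits, prim_lat_vecs):
--     """
--     This function translates flips from their vector from into their dictionary
--     form.
--     Each dictionary is written in the form below:
--     {
--      'from':
--            {sublattice_id:
--                {specie_nbit_id:
--                    number_of_this_specie_to_be_anihilated_from_this_sublat
--                }
--                 ...
--            }
--            ...
--      'to':
--            {
--            ...     numbr_of_this_specie_to_be_generated_on_this_sublat
--            }
--     }
--     """
--     n_sls = len(nbits)
--     operations = []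
--
--     for flip_vec in prim_lat_vecs:
--         operation = {'from':{},'to':{}}
--
--         operation['from']={sl_id:{sp_id:0 for sp_id in nbits[sl_id]} for sl_id in range(n_sls)}
--         operation['to'] = {sl_id:{sp_id:0 for sp_id in nbits[sl_id]} for sl_id in range(n_sls)}
--
--         for flip,n_flip in zip(unit_n_swps,flip_vec):
--             if n_flip > 0:
--                 flp_to,flp_from,sl_id = flip
--                 n = n_flip
--             elif n_flip < 0:
--                 flp_from,flp_to,sl_id = flip
--                 n = -n_flip
--             else:
--                 continue
--
--             operation['from'][sl_id][flp_from] += n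
--             operation['to'][sl_id][flp_to] += n
--
--         #Simplify ionic equations
--         operation_clean = {'from':{},'to':{}}
--         for sl_id in range(n_sls):
--             for sp_id in nbits[sl_id]:
--                 del_n = operation['from'][sl_id][sp_id]-operation['to'][sl_id][sp_id]
--                 if del_n > 0:
--                     if sl_id not in operation_clean['from']:
--                         operation_clean['from'][sl_id]={}
--                     operation_clean['from'][sl_id][sp_id]=del_n
--                 elif del_n < 0:
--                     if sl_id not in operation_clean['to']:
--                         operation_clean['to'][sl_id]={}
--                     operation_clean['to'][sl_id][sp_id]= -del_n
--                 else:
--                     continue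
--
--         operations.append(operation_clean)
--
--     return operations
-- ===== SOURCE B (Python) =====
-- def _net(unit_n_swps, flip_vec, sl_id, sp):
--     """Net annihilation count of species sp on sublattice sl_id for this flip
--     vector, computed directly from the swap list (no intermediate tables)."""
--     d = 0
--     for (t0, t1, sl2), n in zip(unit_n_swps, flip_vec):
--         if sl2 == sl_id:
--             if t1 == sp:
--                 d += n
--             if t0 == sp:
--                 d -= n
--     return d
--
--
-- def flipvec_to_operations(unit_n_swps, nbits, prim_lat_vecs):
--     """Translate flip vectors into from/to operation dicts by computing each
--     (sublattice, species) net count independently and directly from the swap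
--     list: no pre-zeroed count tables, no sign branching on n_flip, and no
--     separate subtraction/cleanup phase."""
--     operations = []
--     for flip_vec in prim_lat_vecs:
--         op_from, op_to = {}, {}
--         for sl_id, sps in enumerate(nbits):
--             frm, to = {}, {}
--             for sp in sps:
--                 d = _net(unit_n_swps, flip_vec, sl_id, sp)
--                 if d > 0:
--                     frm[sp] = d
--                 elif d < 0:
--                     to[sp] = -d
--             if frm:
--                 op_from[sl_id] = frm
--             if to:
--                 op_to[sl_id] = to
--         operations.append({'from': op_from, 'to': op_to})
--     return operations
-- ===== Notes on version B (the rewrite author's own statement) =====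
-- stated objective: alternative
-- what changed: B computes each (sublattice, species) net count independently and directly by scanning zip(unit_n_swps, flip_vec) per species (a closed per-entry summation, no sign branching), instead of A's mutated pre-zeroed from/to count tables followed by a subtraction cleanup pass; it trades A's O(swaps + cells) per flip vector for O(cells * swaps) with no intermediate tables.
import Mathlib
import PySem

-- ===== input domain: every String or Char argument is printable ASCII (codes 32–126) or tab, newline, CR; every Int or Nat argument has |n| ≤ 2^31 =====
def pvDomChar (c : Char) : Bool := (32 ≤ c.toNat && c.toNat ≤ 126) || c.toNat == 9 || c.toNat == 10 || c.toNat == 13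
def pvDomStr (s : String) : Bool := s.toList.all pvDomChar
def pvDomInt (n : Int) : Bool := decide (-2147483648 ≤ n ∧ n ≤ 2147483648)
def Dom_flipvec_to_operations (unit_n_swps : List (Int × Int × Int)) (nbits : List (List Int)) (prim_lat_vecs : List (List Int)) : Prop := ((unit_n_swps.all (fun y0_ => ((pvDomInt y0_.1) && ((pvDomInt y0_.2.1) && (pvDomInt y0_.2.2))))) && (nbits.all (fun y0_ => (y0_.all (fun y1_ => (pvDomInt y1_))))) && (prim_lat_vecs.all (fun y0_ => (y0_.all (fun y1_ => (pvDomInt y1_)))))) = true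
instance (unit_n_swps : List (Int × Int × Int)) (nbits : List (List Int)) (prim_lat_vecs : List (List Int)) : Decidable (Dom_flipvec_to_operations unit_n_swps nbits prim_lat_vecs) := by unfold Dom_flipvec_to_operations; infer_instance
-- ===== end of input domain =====

-- B computes each (sublattice, species) net count directly from the swap list per
-- species, replacing A's pre-zeroed mutable from/to count tables and its separate
-- subtraction cleanup pass; objective: alternative (direct per-entry summation,
-- same results, different cost profile).

-- ===== PORT A =====

-- operation[...][sl][sp] += n  (keys are present on every executed update for inputs in Pre_)
def pvA_upd (d : PySem.Dict Int (PySem.Dict Int Int)) (sl sp n : Int) :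
    PySem.Dict Int (PySem.Dict Int Int) :=
  let inner := d.getD sl PySem.Dict.empty
  d.insert sl (inner.insert sp (inner.getD sp 0 + n))

-- the body of `for flip, n_flip in zip(unit_n_swps, flip_vec)`
def pvA_flipStep (st : PySem.Dict Int (PySem.Dict Int Int) × PySem.Dict Int (PySem.Dict Int Int))
    (p : (Int × Int × Int) × Int) :
    PySem.Dict Int (PySem.Dict Int Int) × PySem.Dict Int (PySem.Dict Int Int) :=
  if p.2 > 0 then
    -- flp_to, flp_from, sl_id = flip ; n = n_flip
    (pvA_upd st.1 p.1.2.2 p.1.2.1 p.2, pvA_upd st.2 p.1.2.2 p.1.1 p.2)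
  else if p.2 < 0 then
    -- flp_from, flp_to, sl_id = flip ; n = -n_flip
    (pvA_upd st.1 p.1.2.2 p.1.1 (-p.2), pvA_upd st.2 p.1.2.2 p.1.2.1 (-p.2))
  else st

-- {sl_id: {sp_id: 0 for sp_id in nbits[sl_id]} for sl_id in range(n_sls)}
def pvA_init (nbits : List (List Int)) (n_sls : Int) : PySem.Dict Int (PySem.Dict Int Int) :=
  (PySem.List.pyRange 0 n_sls).foldl
    (fun d sl => d.insert sl
      ((PySem.List.pyGetD nbits sl []).foldl (fun m sp => m.insert sp 0) PySem.Dict.empty))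
    PySem.Dict.empty

-- del_n = operation['from'][sl_id][sp_id] - operation['to'][sl_id][sp_id] (keys present by construction)
def pvA_del (fD tD : PySem.Dict Int (PySem.Dict Int Int)) (sl sp : Int) : Int :=
  (fD.getD sl PySem.Dict.empty).getD sp 0 - (tD.getD sl PySem.Dict.empty).getD sp 0

-- `if sl_id not in d: d[sl_id] = {}` then `d[sl_id][sp_id] = v`
def pvA_cleanIns (d : PySem.Dict Int (PySem.Dict Int Int)) (sl sp v : Int) :
    PySem.Dict Int (PySem.Dict Int Int) :=
  let d1 := if d.contains sl then d else d.insert sl PySem.Dict.empty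
  d1.insert sl ((d1.getD sl PySem.Dict.empty).insert sp v)

def pvA_cleanStep (fD tD : PySem.Dict Int (PySem.Dict Int Int)) (sl : Int)
    (st : PySem.Dict Int (PySem.Dict Int Int) × PySem.Dict Int (PySem.Dict Int Int)) (sp : Int) :
    PySem.Dict Int (PySem.Dict Int Int) × PySem.Dict Int (PySem.Dict Int Int) :=
  let del := pvA_del fD tD sl sp
  if del > 0 then (pvA_cleanIns st.1 sl sp del, st.2)
  else if del < 0 then (st.1, pvA_cleanIns st.2 sl sp (-del))
  else st

-- dict-of-dicts rendered under the type convention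
def pvEncode (d : PySem.Dict Int (PySem.Dict Int Int)) : List (Int × List (Int × Int)) :=
  d.items.map (fun p => (p.1, p.2.items))

def flipvec_to_operations (unit_n_swps : List (Int × Int × Int)) (nbits : List (List Int)) (prim_lat_vecs : List (List Int)) : List (List (String × List (Int × List (Int × Int)))) :=
  let n_sls := PySem.List.len nbits
  prim_lat_vecs.foldl (fun ops fv =>
    let st := (unit_n_swps.zip fv).foldl pvA_flipStep (pvA_init nbits n_sls, pvA_init nbits n_sls)
    let cl := (PySem.List.pyRange 0 n_sls).foldl
      (fun c sl => (PySem.List.pyGetD nbits sl []).foldl (pvA_cleanStep st.1 st.2 sl) c)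
      (PySem.Dict.empty, PySem.Dict.empty)
    ops ++ [[("from", pvEncode cl.1), ("to", pvEncode cl.2)]]) []

-- ===== PORT B =====

-- _net(unit_n_swps, flip_vec, sl_id, sp): a direct scan of the zipped swap list
def pvNet (swps : List (Int × Int × Int)) (fv : List Int) (sl sp : Int) : Int :=
  (swps.zip fv).foldl (fun d p =>
    if p.1.2.2 = sl then
      let d1 := if p.1.2.1 = sp then d + p.2 else d
      if p.1.1 = sp then d1 - p.2 else d1
    else d) 0

-- the body of `for sp in sps` building frm/to for one sublattice
def pvB_cellStep (swps : List (Int × Int × Int)) (fv : List Int) (sl : Int)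
    (pr : PySem.Dict Int Int × PySem.Dict Int Int) (sp : Int) :
    PySem.Dict Int Int × PySem.Dict Int Int :=
  let d := pvNet swps fv sl sp
  if d > 0 then (pr.1.insert sp d, pr.2)
  else if d < 0 then (pr.1, pr.2.insert sp (-d))
  else pr

def flipvec_to_operations_alt (unit_n_swps : List (Int × Int × Int)) (nbits : List (List Int)) (prim_lat_vecs : List (List Int)) : List (List (String × List (Int × List (Int × Int)))) :=
  prim_lat_vecs.foldl (fun ops fv =>
    let st := (PySem.List.enumerate nbits).foldl
      (fun st p =>
        let cell := p.2.foldl (pvB_cellStep unit_n_swps fv p.1) (PySem.Dict.empty, PySem.Dict.empty)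
        (if cell.1.items.isEmpty then st.1 else st.1.insert p.1 cell.1,
         if cell.2.items.isEmpty then st.2 else st.2.insert p.1 cell.2))
      (PySem.Dict.empty, PySem.Dict.empty)
    ops ++ [[("from", pvEncode st.1), ("to", pvEncode st.2)]]) []

-- ===== PRECONDITION & SPEC =====
-- Pre_ excludes exactly the inputs where A raises KeyError: some zipped flip with a
-- nonzero count names a sublattice index outside range(len(nbits)) or a species
-- absent from nbits[sl_id].
def Pre_flipvec_to_operations (unit_n_swps : List (Int × Int × Int)) (nbits : List (List Int)) (prim_lat_vecs : List (List Int)) : Prop :=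
  ∀ fv ∈ prim_lat_vecs, ∀ p ∈ unit_n_swps.zip fv, p.2 ≠ 0 →
    0 ≤ p.1.2.2 ∧ p.1.2.2 + 1 ≤ (nbits.length : Int) ∧
    p.1.1 ∈ nbits.getD p.1.2.2.toNat [] ∧ p.1.2.1 ∈ nbits.getD p.1.2.2.toNat []
instance (unit_n_swps : List (Int × Int × Int)) (nbits : List (List Int)) (prim_lat_vecs : List (List Int)) : Decidable (Pre_flipvec_to_operations unit_n_swps nbits prim_lat_vecs) := by unfold Pre_flipvec_to_operations; infer_instance

def pvWitness_flipvec_to_operations : (List (Int × Int × Int)) × List (List Int) × List (List Int) :=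
  ([(2, 3, 0)], [[2, 3]], [[-1], [1], [2]])

def Spec_flipvec_to_operations (unit_n_swps : List (Int × Int × Int)) (nbits : List (List Int)) (prim_lat_vecs : List (List Int)) (out : List (List (String × List (Int × List (Int × Int))))) : Prop := out = flipvec_to_operations_alt unit_n_swps nbits prim_lat_vecs
set_option maxHeartbeats 8000000 in
instance (unit_n_swps : List (Int × Int × Int)) (nbits : List (List Int)) (prim_lat_vecs : List (List Int)) (out : List (List (String × List (Int × List (Int × Int))))) : Decidable (Spec_flipvec_to_operations unit_n_swps nbits prim_lat_vecs out) := by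
  unfold Spec_flipvec_to_operations
  haveI d3 : DecidableEq (String × List (Int × List (Int × Int))) := inferInstance
  haveI d4 : DecidableEq (List (String × List (Int × List (Int × Int)))) := @instDecidableEqList _ d3
  exact @instDecidableEqList _ d4 _ _

-- ===== CLAIM (what is proved, stated in full; the proofs are below) =====
def Claim_equal_flipvec_to_operations : Prop := ∀ (unit_n_swps : List (Int × Int × Int)) (nbits : List (List Int)) (prim_lat_vecs : List (List Int)), Dom_flipvec_to_operations unit_n_swps nbits prim_lat_vecs → Pre_flipvec_to_operations unit_n_swps nbits prim_lat_vecs → Spec_flipvec_to_operations unit_n_swps nbits prim_lat_vecs (flipvec_to_operations unit_n_swps nbits prim_lat_vecs)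

-- ===== LEMMAS AND PROOFS =====

-- the value A's nested count dicts hold at (sl, sp)
def pvVw (d : PySem.Dict Int (PySem.Dict Int Int)) (sl sp : Int) : Int :=
  (d.getD sl PySem.Dict.empty).getD sp 0

-- the contribution of one zipped swap to the net count at (sl, sp)
def pvC (sl sp : Int) (p : (Int × Int × Int) × Int) : Int :=
  (if p.1.2.2 = sl ∧ p.1.2.1 = sp then p.2 else 0)
    - (if p.1.2.2 = sl ∧ p.1.1 = sp then p.2 else 0)

theorem pv_net_step (sl sp d : Int) (p : (Int × Int × Int) × Int) :
    (if p.1.2.2 = sl then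
      let d1 := if p.1.2.1 = sp then d + p.2 else d
      if p.1.1 = sp then d1 - p.2 else d1
    else d) = d + pvC sl sp p := by
  unfold pvC
  split_ifs <;> simp_all
  omega

theorem pv_net_shift (sl sp : Int) (ps : List ((Int × Int × Int) × Int)) : ∀ d : Int,
    ps.foldl (fun d p =>
      if p.1.2.2 = sl then
        let d1 := if p.1.2.1 = sp then d + p.2 else d
        if p.1.1 = sp then d1 - p.2 else d1
      else d) d = d + (ps.map (pvC sl sp)).sum := by
  induction ps with
  | nil => intro d; simp
  | cons p tl ih =>
    intro d
    simp only [List.foldl_cons, List.map_cons, List.sum_cons]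
    rw [pv_net_step, ih]
    ring

theorem pv_upd_view (d : PySem.Dict Int (PySem.Dict Int Int)) (sl sp n sl' sp' : Int) :
    pvVw (pvA_upd d sl sp n) sl' sp' =
      pvVw d sl' sp' + (if sl' = sl ∧ sp' = sp then n else 0) := by
  unfold pvVw pvA_upd
  rw [PySem.Dict.getD_insert]
  by_cases h1 : sl' = sl
  · subst h1
    rw [if_pos rfl, PySem.Dict.getD_insert]
    by_cases h2 : sp' = sp
    · simp [h2]
    · simp [h2]
  · simp [h1]

-- the difference of A's two count dicts accumulates exactly the direct contributions
theorem pv_acc_inv (ps : List ((Int × Int × Int) × Int)) :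
    ∀ (F T : PySem.Dict Int (PySem.Dict Int Int)) (sl sp : Int),
      pvVw (ps.foldl pvA_flipStep (F, T)).1 sl sp - pvVw (ps.foldl pvA_flipStep (F, T)).2 sl sp
        = pvVw F sl sp - pvVw T sl sp + (ps.map (pvC sl sp)).sum := by
  induction ps with
  | nil => intro F T sl sp; simp
  | cons p tl ih =>
    intro F T sl sp
    simp only [List.foldl_cons, List.map_cons, List.sum_cons]
    have key : pvVw (pvA_flipStep (F, T) p).1 sl sp - pvVw (pvA_flipStep (F, T) p).2 sl sp
        = pvVw F sl sp - pvVw T sl sp + pvC sl sp p := by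
      unfold pvC
      by_cases h1 : p.2 > 0
      · simp only [pvA_flipStep, if_pos h1, pv_upd_view]
        split_ifs <;> omega
      · by_cases h2 : p.2 < 0
        · simp only [pvA_flipStep, if_neg h1, if_pos h2, pv_upd_view]
          split_ifs <;> omega
        · simp only [pvA_flipStep, if_neg h1, if_neg h2]
          split_ifs <;> omega
    calc pvVw (tl.foldl pvA_flipStep (pvA_flipStep (F, T) p)).1 sl sp
          - pvVw (tl.foldl pvA_flipStep (pvA_flipStep (F, T) p)).2 sl sp
        = pvVw (pvA_flipStep (F, T) p).1 sl sp - pvVw (pvA_flipStep (F, T) p).2 sl sp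
            + (tl.map (pvC sl sp)).sum := by
          have h := ih (pvA_flipStep (F, T) p).1 (pvA_flipStep (F, T) p).2 sl sp
          simpa using h
      _ = pvVw F sl sp - pvVw T sl sp + (pvC sl sp p + (tl.map (pvC sl sp)).sum) := by
          rw [key]; ring

-- A's del equals B's directly computed net count
theorem pv_del_eq_net (swps : List (Int × Int × Int)) (fv : List Int)
    (nbits : List (List Int)) (sl sp : Int) :
    pvA_del
      ((swps.zip fv).foldl pvA_flipStep
        (pvA_init nbits (PySem.List.len nbits), pvA_init nbits (PySem.List.len nbits))).1
      ((swps.zip fv).foldl pvA_flipStep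
        (pvA_init nbits (PySem.List.len nbits), pvA_init nbits (PySem.List.len nbits))).2
      sl sp = pvNet swps fv sl sp := by
  unfold pvA_del pvNet
  have h := pv_acc_inv (swps.zip fv)
    (pvA_init nbits (PySem.List.len nbits)) (pvA_init nbits (PySem.List.len nbits)) sl sp
  rw [pv_net_shift]
  unfold pvVw at h
  omega

-- generic one-sublattice emission step: sel sp = the value to record for sp, if any
def pvSelStepA (sl : Int) (sel : Int → Option Int)
    (c : PySem.Dict Int (PySem.Dict Int Int)) (sp : Int) : PySem.Dict Int (PySem.Dict Int Int) :=
  match sel sp with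
  | some v => pvA_cleanIns c sl sp v
  | none => c

def pvSelStepB (sel : Int → Option Int) (m : PySem.Dict Int Int) (sp : Int) : PySem.Dict Int Int :=
  match sel sp with
  | some v => m.insert sp v
  | none => m

def pvSelF (g : Int → Int → Int) (sl sp : Int) : Option Int :=
  if g sl sp > 0 then some (g sl sp) else none

def pvSelT (g : Int → Int → Int) (sl sp : Int) : Option Int :=
  if g sl sp < 0 then some (-(g sl sp)) else none

theorem pv_selB_contains (sel : Int → Option Int) (sps : List Int) (m : PySem.Dict Int Int)
    (x : Int) (h : m.contains x = true) :
    (sps.foldl (pvSelStepB sel) m).contains x = true := by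
  induction sps generalizing m with
  | nil => exact h
  | cons sp tl ih =>
    refine ih _ ?_
    unfold pvSelStepB
    cases sel sp with
    | none => exact h
    | some v => rw [PySem.Dict.contains_insert]; simp [h]

theorem pv_selA_ins (sl : Int) (sel : Int → Option Int) (sps : List Int)
    (c : PySem.Dict Int (PySem.Dict Int Int)) (m : PySem.Dict Int Int) :
    sps.foldl (pvSelStepA sl sel) (c.insert sl m) = c.insert sl (sps.foldl (pvSelStepB sel) m) := by
  induction sps generalizing m with
  | nil => rfl
  | cons sp tl ih =>
    simp only [List.foldl_cons]
    have hstep : pvSelStepA sl sel (c.insert sl m) sp = c.insert sl (pvSelStepB sel m sp) := by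
      unfold pvSelStepA pvSelStepB
      cases sel sp with
      | none => rfl
      | some v =>
        simp only [pvA_cleanIns, PySem.Dict.contains_insert_self, if_pos,
          PySem.Dict.getD_insert_self, PySem.Dict.insert_insert_self]
    rw [hstep, ih]

-- A's incremental per-sublattice emission on a fresh sl key appends exactly B's dict, if nonempty
theorem pv_selA_fresh (sl : Int) (sel : Int → Option Int) (sps : List Int)
    (c : PySem.Dict Int (PySem.Dict Int Int)) (hc : c.contains sl = false) :
    sps.foldl (pvSelStepA sl sel) c =
      (if (sps.foldl (pvSelStepB sel) PySem.Dict.empty).items.isEmpty then c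
       else c.insert sl (sps.foldl (pvSelStepB sel) PySem.Dict.empty)) := by
  induction sps with
  | nil => rfl
  | cons sp tl ih =>
    simp only [List.foldl_cons]
    cases hsel : sel sp with
    | none =>
      have ha : pvSelStepA sl sel c sp = c := by unfold pvSelStepA; rw [hsel]
      have hb : pvSelStepB sel PySem.Dict.empty sp = PySem.Dict.empty := by
        unfold pvSelStepB; rw [hsel]
      rw [ha, hb, ih]
    | some v =>
      have ha : pvSelStepA sl sel c sp = c.insert sl (PySem.Dict.empty.insert sp v) := by
        unfold pvSelStepA pvA_cleanIns
        rw [hsel]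
        simp only [hc, if_false, Bool.false_eq_true, PySem.Dict.getD_insert_self,
          PySem.Dict.insert_insert_self]
      have hb : pvSelStepB sel PySem.Dict.empty sp = PySem.Dict.empty.insert sp v := by
        unfold pvSelStepB; rw [hsel]
      rw [ha, hb, pv_selA_ins]
      have hne : (tl.foldl (pvSelStepB sel) (PySem.Dict.empty.insert sp v)).items.isEmpty = false := by
        have hcont := pv_selB_contains sel tl (PySem.Dict.empty.insert sp v) sp
          (by rw [PySem.Dict.contains_insert]; simp)
        rw [PySem.Dict.contains_iff_mem_keys] at hcont
        rcases hk : (tl.foldl (pvSelStepB sel) (PySem.Dict.empty.insert sp v)).items with _ | ⟨a, l⟩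
        · exfalso
          have : (tl.foldl (pvSelStepB sel) (PySem.Dict.empty.insert sp v)).keys = [] := by
            simp [PySem.Dict.keys, hk]
          simp [this] at hcont
        · rfl
      rw [hne, if_neg (by simp)]

theorem pv_clean_split (F T : PySem.Dict Int (PySem.Dict Int Int)) (sl : Int) (sps : List Int)
    (st : PySem.Dict Int (PySem.Dict Int Int) × PySem.Dict Int (PySem.Dict Int Int)) :
    sps.foldl (pvA_cleanStep F T sl) st =
      (sps.foldl (pvSelStepA sl (pvSelF (pvA_del F T) sl)) st.1,
       sps.foldl (pvSelStepA sl (pvSelT (pvA_del F T) sl)) st.2) := by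
  induction sps generalizing st with
  | nil => rfl
  | cons sp tl ih =>
    simp only [List.foldl_cons]
    rw [ih]
    congr 1
    · unfold pvA_cleanStep pvSelStepA pvSelF
      by_cases h1 : pvA_del F T sl sp > 0
      · simp [h1]
      · by_cases h2 : pvA_del F T sl sp < 0 <;> simp [h1, h2]
    · unfold pvA_cleanStep pvSelStepA pvSelT
      by_cases h1 : pvA_del F T sl sp > 0
      · simp [h1, show ¬(pvA_del F T sl sp < 0) by omega]
      · by_cases h2 : pvA_del F T sl sp < 0 <;> simp [h1, h2]

-- B's per-sublattice pair fold splits into the two generic selection folds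
theorem pv_cell_split (swps : List (Int × Int × Int)) (fv : List Int) (sl : Int) (sps : List Int)
    (st : PySem.Dict Int Int × PySem.Dict Int Int) :
    sps.foldl (pvB_cellStep swps fv sl) st =
      (sps.foldl (pvSelStepB (pvSelF (pvNet swps fv) sl)) st.1,
       sps.foldl (pvSelStepB (pvSelT (pvNet swps fv) sl)) st.2) := by
  induction sps generalizing st with
  | nil => rfl
  | cons sp tl ih =>
    simp only [List.foldl_cons]
    rw [ih]
    congr 1
    · unfold pvB_cellStep pvSelStepB pvSelF
      by_cases h1 : pvNet swps fv sl sp > 0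
      · simp [h1]
      · by_cases h2 : pvNet swps fv sl sp < 0 <;> simp [h1, h2]
    · unfold pvB_cellStep pvSelStepB pvSelT
      by_cases h1 : pvNet swps fv sl sp > 0
      · simp [h1, show ¬(pvNet swps fv sl sp < 0) by omega]
      · by_cases h2 : pvNet swps fv sl sp < 0 <;> simp [h1, h2]

theorem pv_enum (xs : List (List Int)) : ∀ s : Int,
    PySem.List.enumerate xs s
      = (List.range xs.length).map (fun k : Nat => ((s + k : Int), xs.getD k [])) := by
  induction xs with
  | nil => intro s; rfl
  | cons x tl ih =>
    intro s
    have h1 : PySem.List.enumerate (x :: tl) s = (s, x) :: PySem.List.enumerate tl (s + 1) := rfl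
    rw [h1, ih (s + 1)]
    simp only [List.length_cons, List.range_succ_eq_map, List.map_cons, List.map_map]
    congr 1
    · simp
    · apply List.map_congr_left
      intro k _
      simp only [Function.comp, List.getD_cons_succ, Prod.mk.injEq]
      refine ⟨by push_cast; ring, trivial⟩

-- both emission loops written over List.range, with a generic net-count function g
def pvEmitA (F T : PySem.Dict Int (PySem.Dict Int Int)) (nbits : List (List Int)) (n : Nat) :
    PySem.Dict Int (PySem.Dict Int Int) × PySem.Dict Int (PySem.Dict Int Int) :=
  (List.range n).foldl (fun c (k : Nat) => (nbits.getD k []).foldl (pvA_cleanStep F T (↑k : Int)) c)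
    (PySem.Dict.empty, PySem.Dict.empty)

def pvPick (g : Int → Int → Int) (sl : Int) (sps : List Int) :
    PySem.Dict Int Int × PySem.Dict Int Int :=
  (sps.foldl (pvSelStepB (pvSelF g sl)) PySem.Dict.empty,
   sps.foldl (pvSelStepB (pvSelT g sl)) PySem.Dict.empty)

def pvEmitB (g : Int → Int → Int) (nbits : List (List Int)) (n : Nat) :
    PySem.Dict Int (PySem.Dict Int Int) × PySem.Dict Int (PySem.Dict Int Int) :=
  (List.range n).foldl (fun st (k : Nat) =>
    (if (pvPick g (↑k : Int) (nbits.getD k [])).1.items.isEmpty then st.1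
     else st.1.insert (↑k : Int) (pvPick g (↑k : Int) (nbits.getD k [])).1,
     if (pvPick g (↑k : Int) (nbits.getD k [])).2.items.isEmpty then st.2
     else st.2.insert (↑k : Int) (pvPick g (↑k : Int) (nbits.getD k [])).2))
    (PySem.Dict.empty, PySem.Dict.empty)

theorem pv_emit (F T : PySem.Dict Int (PySem.Dict Int Int)) (g : Int → Int → Int)
    (h : pvA_del F T = g) (nbits : List (List Int)) : ∀ n : Nat,
    pvEmitA F T nbits n = pvEmitB g nbits n
      ∧ (∀ x ∈ (pvEmitA F T nbits n).1.keys, ∃ j : Nat, j < n ∧ x = (j : Int))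
      ∧ (∀ x ∈ (pvEmitA F T nbits n).2.keys, ∃ j : Nat, j < n ∧ x = (j : Int)) := by
  intro n
  induction n with
  | zero =>
    refine ⟨rfl, ?_, ?_⟩ <;> · intro x hx; simp [pvEmitA, PySem.Dict.keys_empty] at hx
  | succ n ih =>
    obtain ⟨ihEq, ihK1, ihK2⟩ := ih
    have hA : pvEmitA F T nbits (n + 1)
        = (nbits.getD n []).foldl (pvA_cleanStep F T (n : Int)) (pvEmitA F T nbits n) := by
      unfold pvEmitA
      rw [List.range_succ, List.foldl_append]
      rfl
    have hB : pvEmitB g nbits (n + 1)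
        = (fun st => (if (pvPick g (n : Int) (nbits.getD n [])).1.items.isEmpty then st.1
             else st.1.insert (n : Int) (pvPick g (n : Int) (nbits.getD n [])).1,
             if (pvPick g (n : Int) (nbits.getD n [])).2.items.isEmpty then st.2
             else st.2.insert (n : Int) (pvPick g (n : Int) (nbits.getD n [])).2))
          (pvEmitB g nbits n) := by
      unfold pvEmitB
      rw [List.range_succ, List.foldl_append]
      rfl
    have hf1 : (pvEmitA F T nbits n).1.contains (↑n : Int) = false := by
      rcases hcc : (pvEmitA F T nbits n).1.contains (↑n : Int) with _ | _
      · rfl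
      · exfalso
        obtain ⟨j, hj, hx⟩ := ihK1 _ ((PySem.Dict.contains_iff_mem_keys _ _).mp hcc)
        omega
    have hf2 : (pvEmitA F T nbits n).2.contains (↑n : Int) = false := by
      rcases hcc : (pvEmitA F T nbits n).2.contains (↑n : Int) with _ | _
      · rfl
      · exfalso
        obtain ⟨j, hj, hx⟩ := ihK2 _ ((PySem.Dict.contains_iff_mem_keys _ _).mp hcc)
        omega
    have hmain : pvEmitA F T nbits (n + 1)
        = (if (pvPick g (↑n : Int) (nbits.getD n [])).1.items.isEmpty
             then (pvEmitA F T nbits n).1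
           else (pvEmitA F T nbits n).1.insert (↑n : Int) (pvPick g (↑n : Int) (nbits.getD n [])).1,
           if (pvPick g (↑n : Int) (nbits.getD n [])).2.items.isEmpty
             then (pvEmitA F T nbits n).2
           else (pvEmitA F T nbits n).2.insert (↑n : Int) (pvPick g (↑n : Int) (nbits.getD n [])).2) := by
      rw [hA, pv_clean_split, h]
      unfold pvPick
      rw [pv_selA_fresh _ _ _ _ hf1, pv_selA_fresh _ _ _ _ hf2]
    refine ⟨?_, ?_, ?_⟩
    · rw [hmain, hB, ← ihEq]
    · intro x hx
      rw [hmain] at hx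
      simp only [] at hx
      by_cases he : (pvPick g (↑n : Int) (nbits.getD n [])).1.items.isEmpty
      · rw [if_pos he] at hx
        obtain ⟨j, hj, hxx⟩ := ihK1 x hx
        exact ⟨j, by omega, hxx⟩
      · rw [if_neg he] at hx
        rcases (PySem.Dict.mem_keys_insert _ _ _ _).mp hx with h1 | h1
        · exact ⟨n, by omega, h1⟩
        · obtain ⟨j, hj, hxx⟩ := ihK1 x h1
          exact ⟨j, by omega, hxx⟩
    · intro x hx
      rw [hmain] at hx
      simp only [] at hx
      by_cases he : (pvPick g (↑n : Int) (nbits.getD n [])).2.items.isEmpty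
      · rw [if_pos he] at hx
        obtain ⟨j, hj, hxx⟩ := ihK2 x hx
        exact ⟨j, by omega, hxx⟩
      · rw [if_neg he] at hx
        rcases (PySem.Dict.mem_keys_insert _ _ _ _).mp hx with h1 | h1
        · exact ⟨n, by omega, h1⟩
        · obtain ⟨j, hj, hxx⟩ := ihK2 x h1
          exact ⟨j, by omega, hxx⟩

-- agreement of the two per-flip-vector computations
theorem pv_fv (swps : List (Int × Int × Int)) (nbits : List (List Int)) (fv : List Int) :
    ((PySem.List.pyRange 0 (PySem.List.len nbits)).foldl
        (fun c sl => (PySem.List.pyGetD nbits sl []).foldl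
          (pvA_cleanStep
            ((swps.zip fv).foldl pvA_flipStep
              (pvA_init nbits (PySem.List.len nbits), pvA_init nbits (PySem.List.len nbits))).1
            ((swps.zip fv).foldl pvA_flipStep
              (pvA_init nbits (PySem.List.len nbits), pvA_init nbits (PySem.List.len nbits))).2 sl) c)
        (PySem.Dict.empty, PySem.Dict.empty))
      = ((PySem.List.enumerate nbits).foldl
          (fun st p =>
            let cell := p.2.foldl (pvB_cellStep swps fv p.1) (PySem.Dict.empty, PySem.Dict.empty)
            (if cell.1.items.isEmpty then st.1 else st.1.insert p.1 cell.1,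
             if cell.2.items.isEmpty then st.2 else st.2.insert p.1 cell.2))
          (PySem.Dict.empty, PySem.Dict.empty)) := by
  have hdel : pvA_del
      ((swps.zip fv).foldl pvA_flipStep
        (pvA_init nbits (PySem.List.len nbits), pvA_init nbits (PySem.List.len nbits))).1
      ((swps.zip fv).foldl pvA_flipStep
        (pvA_init nbits (PySem.List.len nbits), pvA_init nbits (PySem.List.len nbits))).2
      = pvNet swps fv :=
    funext fun sl => funext fun sp => pv_del_eq_net swps fv nbits sl sp
  have hA : ((PySem.List.pyRange 0 (PySem.List.len nbits)).foldl
        (fun c sl => (PySem.List.pyGetD nbits sl []).foldl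
          (pvA_cleanStep
            ((swps.zip fv).foldl pvA_flipStep
              (pvA_init nbits (PySem.List.len nbits), pvA_init nbits (PySem.List.len nbits))).1
            ((swps.zip fv).foldl pvA_flipStep
              (pvA_init nbits (PySem.List.len nbits), pvA_init nbits (PySem.List.len nbits))).2 sl) c)
        (PySem.Dict.empty, PySem.Dict.empty))
      = pvEmitA
          ((swps.zip fv).foldl pvA_flipStep
            (pvA_init nbits (PySem.List.len nbits), pvA_init nbits (PySem.List.len nbits))).1
          ((swps.zip fv).foldl pvA_flipStep
            (pvA_init nbits (PySem.List.len nbits), pvA_init nbits (PySem.List.len nbits))).2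
          nbits nbits.length := by
    rw [PySem.List.len_eq, PySem.List.pyRange_zero_natCast, List.foldl_map]
    unfold pvEmitA
    apply PySem.List.foldl_congr_mem
    intro acc k _
    simp only [PySem.List.pyGetD_natCast]
  have hB : ((PySem.List.enumerate nbits).foldl
          (fun st p =>
            let cell := p.2.foldl (pvB_cellStep swps fv p.1) (PySem.Dict.empty, PySem.Dict.empty)
            (if cell.1.items.isEmpty then st.1 else st.1.insert p.1 cell.1,
             if cell.2.items.isEmpty then st.2 else st.2.insert p.1 cell.2))
          (PySem.Dict.empty, PySem.Dict.empty))
      = pvEmitB (pvNet swps fv) nbits nbits.length := by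
    rw [pv_enum nbits 0, List.foldl_map]
    unfold pvEmitB
    apply PySem.List.foldl_congr_mem
    intro acc k _
    simp only [zero_add, pv_cell_split, pvPick]
  rw [hA, hB]
  exact (pv_emit _ _ _ hdel nbits nbits.length).1

-- ===== VERDICT (by name: the statement is the Claim_ definition above) =====
theorem flipvec_to_operations_spec : Claim_equal_flipvec_to_operations := by
  intro swps nbits plv _ _
  unfold Spec_flipvec_to_operations
  simp only [flipvec_to_operations, flipvec_to_operations_alt]
  have main : ∀ (l : List (List Int)) (acc : List (List (String × List (Int × List (Int × Int))))),
      l.foldl (fun ops fv =>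
        let st := (swps.zip fv).foldl pvA_flipStep
          (pvA_init nbits (PySem.List.len nbits), pvA_init nbits (PySem.List.len nbits))
        let cl := (PySem.List.pyRange 0 (PySem.List.len nbits)).foldl
          (fun c sl => (PySem.List.pyGetD nbits sl []).foldl (pvA_cleanStep st.1 st.2 sl) c)
          (PySem.Dict.empty, PySem.Dict.empty)
        ops ++ [[("from", pvEncode cl.1), ("to", pvEncode cl.2)]]) acc
      = l.foldl (fun ops fv =>
        let st := (PySem.List.enumerate nbits).foldl
          (fun st p =>
            let cell := p.2.foldl (pvB_cellStep swps fv p.1) (PySem.Dict.empty, PySem.Dict.empty)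
            (if cell.1.items.isEmpty then st.1 else st.1.insert p.1 cell.1,
             if cell.2.items.isEmpty then st.2 else st.2.insert p.1 cell.2))
          (PySem.Dict.empty, PySem.Dict.empty)
        ops ++ [[("from", pvEncode st.1), ("to", pvEncode st.2)]]) acc := by
    intro l
    induction l with
    | nil => intro acc; rfl
    | cons fv tl ih =>
      intro acc
      simp only [List.foldl_cons]
      have := pv_fv swps nbits fv
      rw [ih]
      congr 2
      rw [this]
  exact main plv []
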